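-- pv_equiv track=rewrite | github.com/github-anonymous-submission/pose2motion_submission | data_util.py | update_parent_list
-- ===== SOURCE A (Python) =====
-- def update_parent_list(parent_list,virtual_nodes):
--     '''
--     :param parent_list: a list of parent index
--     :param virtual_nodes: a list of virtual node index
--     :return: a list of parent index after removing virtual nodes
--     '''
--     parent_list_new = []
--     for i,p in enumerate(parent_list):
--         new_p = p
--         for node in list(virtual_nodes):
--             if p>node:
--                 new_p=new_p-1
--         if i not in virtual_nodes:
--             parent_list_new.append(new_p)
--
--     parent_list_new[0] = -1
--     return parent_list_new
-- ===== SOURCE B (Python) =====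
-- def _bisect_left(a, x):
--     lo, hi = 0, len(a)
--     while lo < hi:
--         mid = (lo + hi) // 2
--         if a[mid] < x:
--             lo = mid + 1
--         else:
--             hi = mid
--     return lo
--
-- def update_parent_list(parent_list, virtual_nodes):
--     sv = sorted(virtual_nodes)
--     vset = set(virtual_nodes)
--     parent_list_new = [p - _bisect_left(sv, p)
--                        for i, p in enumerate(parent_list) if i not in vset]
--     parent_list_new[0] = -1
--     return parent_list_new
-- ===== Notes on version B (the rewrite author's own statement) =====
-- stated objective: faster
-- what changed: Replaces the per-parent inner scan over virtual_nodes by one sort of virtual_nodes plus a binary search (bisect_left) per parent, and the linear 'i not in virtual_nodes' membership test by a set.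
import Mathlib
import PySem

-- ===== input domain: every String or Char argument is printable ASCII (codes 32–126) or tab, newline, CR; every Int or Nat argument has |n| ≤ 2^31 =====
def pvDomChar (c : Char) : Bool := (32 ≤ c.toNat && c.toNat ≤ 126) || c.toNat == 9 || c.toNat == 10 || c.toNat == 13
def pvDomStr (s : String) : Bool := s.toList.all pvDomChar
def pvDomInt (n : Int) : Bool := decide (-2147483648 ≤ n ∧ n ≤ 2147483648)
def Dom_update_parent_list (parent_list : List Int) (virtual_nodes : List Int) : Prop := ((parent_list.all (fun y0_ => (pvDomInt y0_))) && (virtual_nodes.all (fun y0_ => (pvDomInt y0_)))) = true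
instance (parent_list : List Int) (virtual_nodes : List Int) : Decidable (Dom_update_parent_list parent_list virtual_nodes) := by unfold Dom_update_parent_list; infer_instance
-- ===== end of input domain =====

-- B replaces A's inner scan over virtual_nodes by sort + binary search (bisect_left) and the
-- linear index-membership test by a set: objective = faster (O(n*v) -> O((n+v) log v)).

-- ===== PORT A =====
def update_parent_list (parent_list : List Int) (virtual_nodes : List Int) : List Int :=
  let parent_list_new :=
    (PySem.List.enumerate parent_list 0).foldl
      (fun acc ip =>
        let new_p := virtual_nodes.foldl
          (fun np node => if ip.2 > node then np - 1 else np) ip.2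
        if ip.1 ∉ virtual_nodes then acc ++ [new_p] else acc) []
  -- parent_list_new[0] = -1 : raises IndexError on [] (excluded by Pre_)
  match parent_list_new with
  | [] => []
  | _ :: t => -1 :: t

-- ===== PORT B =====
def update_parent_list_alt (parent_list : List Int) (virtual_nodes : List Int) : List Int :=
  let sv := PySem.List.sorted virtual_nodes (fun x => x) false
  let vset := PySem.Set.ofList virtual_nodes
  let parent_list_new :=
    ((PySem.List.enumerate parent_list 0).filter (fun ip => ip.1 ∉ vset)).map
      (fun ip => ip.2 - (PySem.List.bisectLeft sv ip.2 : Int))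
  -- parent_list_new[0] = -1 : raises IndexError on [] (excluded by Pre_)
  match parent_list_new with
  | [] => []
  | _ :: t => -1 :: t

-- ===== PRECONDITION & SPEC =====
-- Pre_ excludes exactly the inputs on which Python A raises IndexError at `parent_list_new[0] = -1`:
-- those where every index of parent_list occurs in virtual_nodes (in particular the empty parent_list).
def Pre_update_parent_list (parent_list : List Int) (virtual_nodes : List Int) : Prop :=
  ∃ k ∈ List.range parent_list.length, (k : Int) ∉ virtual_nodes
instance (parent_list : List Int) (virtual_nodes : List Int) : Decidable (Pre_update_parent_list parent_list virtual_nodes) := by unfold Pre_update_parent_list; infer_instance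

def pvWitness_update_parent_list : List Int × List Int := ([0, 0, 1, 1], [1, 2])

def Spec_update_parent_list (parent_list : List Int) (virtual_nodes : List Int) (out : List Int) : Prop := out = update_parent_list_alt parent_list virtual_nodes
instance (parent_list : List Int) (virtual_nodes : List Int) (out : List Int) : Decidable (Spec_update_parent_list parent_list virtual_nodes out) := by unfold Spec_update_parent_list; infer_instance

-- ===== CLAIM (what is proved, stated in full; the proofs are below) =====
def Claim_equal_update_parent_list : Prop := ∀ (parent_list : List Int) (virtual_nodes : List Int), Dom_update_parent_list parent_list virtual_nodes → Pre_update_parent_list parent_list virtual_nodes → Spec_update_parent_list parent_list virtual_nodes (update_parent_list parent_list virtual_nodes)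

-- ===== LEMMAS AND PROOFS =====

-- A's inner loop: subtracting 1 per virtual node below p is p minus the count of such nodes.
theorem foldl_sub_one_count (vn : List Int) (p a : Int) :
    vn.foldl (fun np node => if p > node then np - 1 else np) a
      = a - (vn.countP (fun node => decide (node < p)) : Int) := by
  induction vn generalizing a with
  | nil => simp
  | cons v t ih =>
    simp only [List.foldl_cons, List.countP_cons, ih]
    by_cases h : v < p
    · simp [h]; ring
    · simp [h]

-- counting lemma: a predicate that holds exactly on the first k positions has count k
theorem countP_eq_of_prefix (x : Int) (s : List Int) (k : Nat) (hk : k ≤ s.length)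
    (h1 : ∀ j (hj : j < s.length), j < k → s[j] < x)
    (h2 : ∀ j (hj : j < s.length), k ≤ j → x ≤ s[j]) :
    s.countP (fun v => decide (v < x)) = k := by
  induction s generalizing k with
  | nil => simp_all
  | cons v t ih =>
    cases k with
    | zero =>
      have hall : ∀ y ∈ v :: t, ¬ y < x := by
        intro y hy
        obtain ⟨j, hj, rfl⟩ := List.getElem_of_mem hy
        exact not_lt.2 (h2 j hj (Nat.zero_le j))
      rw [List.countP_eq_zero.2 (by intro y hy; simpa using hall y hy)]
    | succ k' =>
      have hv : v < x := h1 0 (by simp) (Nat.succ_pos k')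
      rw [List.countP_cons]
      have := ih k' (by simpa using hk)
        (fun j hj hjk => h1 (j+1) (by simpa using hj) (by omega))
        (fun j hj hjk => h2 (j+1) (by simpa using hj) (by omega))
      simp [this, hv]

-- bisect_left on sorted(vn) counts the virtual nodes strictly below x
theorem bisectLeft_sorted_eq_countP (vn : List Int) (x : Int) :
    (PySem.List.bisectLeft (PySem.List.sorted vn (fun x => x) false) x : Nat)
      = vn.countP (fun node => decide (node < x)) := by
  set sv := PySem.List.sorted vn (fun x => x) false with hsv
  have hpair : sv.Pairwise (· ≤ ·) := by
    simpa using PySem.List.sorted_pairwise vn (fun x => x)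
  obtain ⟨hle, h1, h2⟩ := PySem.List.bisectLeft_spec sv x hpair
  have hcount : sv.countP (fun v => decide (v < x)) = PySem.List.bisectLeft sv x :=
    countP_eq_of_prefix x sv _ hle h1 h2
  have hperm : sv.Perm vn := PySem.List.sorted_perm vn (fun x => x) false
  rw [← hperm.countP_eq, hcount]

-- Prop-ite form of PySem.List.foldl_append_if, used to name A's accumulator loop
theorem foldl_append_ite {a b : Type} (p : a → Prop) [DecidablePred p] (f : a → b)
    (l : List a) (acc : List b) :
    l.foldl (fun acc x => if p x then acc ++ [f x] else acc) acc
      = acc ++ (l.filter (fun x => decide (p x))).map f := by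
  simpa using PySem.List.foldl_append_if (fun x => decide (p x)) f l acc

theorem update_parent_list_eq_alt (parent_list virtual_nodes : List Int) :
    update_parent_list parent_list virtual_nodes
      = update_parent_list_alt parent_list virtual_nodes := by
  simp only [update_parent_list, update_parent_list_alt]
  rw [foldl_append_ite (fun ip => ip.1 ∉ virtual_nodes)
    (fun ip => virtual_nodes.foldl (fun np node => if ip.2 > node then np - 1 else np) ip.2)
    (PySem.List.enumerate parent_list 0) []]
  have hfilter : ∀ (l : List (Int × Int)),
      l.filter (fun ip => ip.1 ∉ virtual_nodes)
        = l.filter (fun ip => ip.1 ∉ PySem.Set.ofList virtual_nodes) := by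
    intro l
    apply List.filter_congr
    intro ip _
    simp [PySem.Set.mem_ofList]
  have hmap : ∀ (l : List (Int × Int)),
      l.map (fun ip => virtual_nodes.foldl
          (fun np node => if ip.2 > node then np - 1 else np) ip.2)
        = l.map (fun ip => ip.2 -
            (PySem.List.bisectLeft (PySem.List.sorted virtual_nodes (fun x => x) false) ip.2 : Int)) := by
    intro l
    apply List.map_congr_left
    intro ip _
    rw [foldl_sub_one_count, bisectLeft_sorted_eq_countP]
  simp only [List.nil_append]
  rw [hfilter, hmap]

-- ===== VERDICT (by name: the statement is the Claim_ definition above) =====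
theorem update_parent_list_spec : Claim_equal_update_parent_list := by
  intro parent_list virtual_nodes _ _
  exact update_parent_list_eq_alt parent_list virtual_nodes
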